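-- pv_equiv track=rewrite | github.com/shinPark43/LeetCode | Solutions/Hash_Table/Find_Most_Frequent_Vowel_and_Consonant.py | maxFreqSum
-- ===== SOURCE A (Python) =====
-- def maxFreqSum(s):
--     """
--     :type s: str
--     :rtype: int
--     """
--     vowel = {'a', 'e', 'i', 'o', 'u'}
--     hash_map = {}
--     vowel_max = 0
--     consonant_max = 0
--
--     for i in range(ord('a'), ord('z')+1):
--         hash_map[chr(i)] = 0
--
--     for char in s:
--         hash_map[char] += 1
--         if char in vowel and hash_map[char] > vowel_max:
--             vowel_max = hash_map[char]
--         elif char not in vowel and hash_map[char] > consonant_max: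
--             consonant_max = hash_map[char]
--     return vowel_max + consonant_max
-- ===== SOURCE B (Python) =====
-- def maxFreqSum(s):
--     """
--     :type s: str
--     :rtype: int
--     """
--     vowels = 'aeiou'
--     freq = {}
--     for ch in s:
--         freq[ch] = freq.get(ch, 0) + 1
--     vowel_max = max((freq.get(c, 0) for c in vowels), default=0)
--     consonant_max = max((n for c, n in freq.items() if c not in vowels), default=0)
--     return vowel_max + consonant_max
-- ===== Notes on version B (the rewrite author's own statement) =====
-- stated objective: idiomatic
-- what changed: B replaces A's fused loop (pre-initialized a-z table plus running maxima updated on every character) with a count-then-aggregate structure: one dict.get counting pass over the string, then the two maxima computed by separate aggregations over the vowel letters and over the counted items.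
-- outside the precondition, e.g. on maxFreqSum('a_b'): A raises KeyError, B returns 2
import Mathlib
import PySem

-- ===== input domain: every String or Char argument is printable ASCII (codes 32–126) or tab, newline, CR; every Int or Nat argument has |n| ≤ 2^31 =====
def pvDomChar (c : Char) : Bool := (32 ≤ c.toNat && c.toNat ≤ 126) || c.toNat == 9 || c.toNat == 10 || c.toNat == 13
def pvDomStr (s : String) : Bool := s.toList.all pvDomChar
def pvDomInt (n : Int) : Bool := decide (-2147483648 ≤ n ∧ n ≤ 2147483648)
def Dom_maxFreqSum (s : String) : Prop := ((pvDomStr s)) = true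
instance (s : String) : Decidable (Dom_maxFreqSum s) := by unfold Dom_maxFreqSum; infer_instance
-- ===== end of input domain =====

-- B replaces A's fused single pass (a-z zero table + running maxima) by a count-then-aggregate
-- decomposition: count characters once, then take the vowel / consonant maxima separately.

-- ===== PORT A =====
-- Python A reads hash_map[char]; under Pre_ every character of s is one of the keys 'a'..'z'
-- pre-inserted by the range loop, so the lookup never misses (getD is exact there; outside
-- Pre_ Python raises KeyError and those inputs are excluded).
def maxFreqSumStep (vowel : PySem.Set Char) (st : PySem.Dict Char Int × Int × Int)
    (ch : Char) : PySem.Dict Char Int × Int × Int :=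
  let n := st.1.getD ch 0 + 1
  let d := st.1.insert ch n
  if vowel.contains ch ∧ n > st.2.1 then (d, n, st.2.2)
  else if ¬ (vowel.contains ch = true) ∧ n > st.2.2 then (d, st.2.1, n)
  else (d, st.2.1, st.2.2)

def maxFreqSum (s : String) : Int :=
  let vowel : PySem.Set Char := PySem.Set.ofList ['a', 'e', 'i', 'o', 'u']
  let hash0 : PySem.Dict Char Int :=
    (PySem.List.pyRange 97 123 1).foldl (fun d i => d.insert (Char.ofNat i.toNat) 0)
      PySem.Dict.empty
  let st := s.toList.foldl (maxFreqSumStep vowel) (hash0, 0, 0)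
  st.2.1 + st.2.2

-- ===== PORT B =====
def maxFreqSum_alt (s : String) : Int :=
  let vowels : List Char := ['a', 'e', 'i', 'o', 'u']
  let freq : PySem.Dict Char Int :=
    s.toList.foldl (fun d ch => d.insert ch (d.getD ch 0 + 1)) PySem.Dict.empty
  let vowelMax := PySem.List.maxD (vowels.map (fun c => freq.getD c 0)) (fun x => x) 0
  let consonantMax := PySem.List.maxD
    ((freq.items.filter (fun p => !vowels.contains p.1)).map (fun p => p.2)) (fun x => x) 0
  vowelMax + consonantMax

-- ===== PRECONDITION & SPEC =====
-- Pre_ admits exactly the strings of lowercase letters a-z: on any other character A's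
-- the increment of hash_map at that character raises KeyError (A returns on no excluded input).
def Pre_maxFreqSum (s : String) : Prop := s.toList.all (fun c => 97 ≤ c.toNat && c.toNat ≤ 122) = true
instance (s : String) : Decidable (Pre_maxFreqSum s) := by unfold Pre_maxFreqSum; infer_instance
def pvWitness_maxFreqSum : String := "ab"
def Spec_maxFreqSum (s : String) (out : Int) : Prop := out = maxFreqSum_alt s
instance (s : String) (out : Int) : Decidable (Spec_maxFreqSum s out) := by unfold Spec_maxFreqSum; infer_instance

-- ===== CLAIM (what is proved, stated in full; the proofs are below) =====
def Claim_equal_maxFreqSum : Prop := ∀ (s : String), Dom_maxFreqSum s → Pre_maxFreqSum s → Spec_maxFreqSum s (maxFreqSum s)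

-- ===== LEMMAS AND PROOFS =====

def pvVow : List Char := ['a', 'e', 'i', 'o', 'u']
def pvConsL : List Char :=
  ['b', 'c', 'd', 'f', 'g', 'h', 'j', 'k', 'l', 'm', 'n', 'p', 'q',
   'r', 's', 't', 'v', 'w', 'x', 'y', 'z']
def pvV (l : List Char) : Int := (pvVow.map (fun c => (l.count c : Int))).foldl max 0
def pvC (l : List Char) : Int := (pvConsL.map (fun c => (l.count c : Int))).foldl max 0

lemma pv_foldl_max_out (l : List Int) (a m : Int) :
    l.foldl max (max a m) = max (l.foldl max a) m := by
  induction l generalizing a with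
  | nil => rfl
  | cons b t ih => simpa [max_right_comm a m b] using ih (max a b)

lemma pv_foldmax_incr (cs : List Char) (hnd : cs.Nodup) (f g : Char → Int) (x : Char)
    (hx : x ∈ cs) (hf : ∀ c ∈ cs, c ≠ x → g c = f c) (hgx : g x = f x + 1) (a : Int) :
    (cs.map g).foldl max a = max ((cs.map f).foldl max a) (f x + 1) := by
  induction cs generalizing a with
  | nil => cases hx
  | cons c t ih =>
    rcases List.mem_cons.mp hx with rfl | hxt
    · have ht : ∀ y ∈ t, g y = f y := fun y hy =>
        hf y (List.mem_cons_of_mem _ hy) (fun h => (List.nodup_cons.mp hnd).1 (h ▸ hy))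
      simp only [List.map_cons, List.foldl_cons, List.map_congr_left ht, hgx]
      rw [pv_foldl_max_out, pv_foldl_max_out]
      have h1 := (PySem.List.le_foldl_max (t.map f) a).1
      omega
    · have hcx : c ≠ x := fun h => (List.nodup_cons.mp hnd).1 (h ▸ hxt)
      simp only [List.map_cons, List.foldl_cons,
        hf c (List.mem_cons_self) hcx]
      exact ih (List.nodup_cons.mp hnd).2 hxt
        (fun y hy => hf y (List.mem_cons_of_mem _ hy)) (max a (f c))

lemma pv_maxD_eq_foldl (L : List Int) (h : ∀ y ∈ L, 0 ≤ y) :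
    PySem.List.maxD L (fun x => x) 0 = L.foldl max 0 := by
  cases L with
  | nil => rfl
  | cons x t =>
    have h0 : max (0 : Int) x = x := max_eq_right (h x (List.mem_cons_self))
    simp [PySem.List.maxD, PySem.List.max?_id_cons, List.foldl_cons, h0]

lemma pv_hash0_aux (L : List Int) (d : PySem.Dict Char Int) (hd : ∀ x, d.getD x 0 = 0)
    (c : Char) :
    (L.foldl (fun d i => d.insert (Char.ofNat i.toNat) 0) d).getD c 0 = 0 := by
  induction L generalizing d with
  | nil => exact hd c
  | cons i t ih =>
    refine ih _ (fun x => ?_)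
    rw [PySem.Dict.getD_insert]
    split <;> simp [hd]

lemma pv_hash0_getD (c : Char) :
    ((PySem.List.pyRange 97 123 1).foldl (fun d i => d.insert (Char.ofNat i.toNat) 0)
      (PySem.Dict.empty : PySem.Dict Char Int)).getD c 0 = 0 :=
  pv_hash0_aux _ _ (fun _ => rfl) c

lemma pv_count_snoc_self (l : List Char) (ch : Char) :
    ((l ++ [ch]).count ch : Int) = (l.count ch : Int) + 1 := by
  simp [List.count_append]

lemma pv_count_snoc_ne (l : List Char) (ch c : Char) (h : c ≠ ch) :
    ((l ++ [ch]).count c : Int) = (l.count c : Int) := by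
  simp [List.count_append, Ne.symm h]

lemma pv_mem_cons (c : Char) (h1 : 97 ≤ c.toNat) (h2 : c.toNat ≤ 122)
    (hnv : c ∉ pvVow) : c ∈ pvConsL := by
  have hc := Char.ofNat_toNat c
  interval_cases h : c.toNat <;>
    first
      | (rw [← hc]; decide)
      | (exact absurd (by rw [← hc]; decide) hnv)

lemma pv_invA (l : List Char) (h : ∀ c ∈ l, 97 ≤ c.toNat ∧ c.toNat ≤ 122) :
    l.foldl (maxFreqSumStep (PySem.Set.ofList ['a', 'e', 'i', 'o', 'u']))
      (((PySem.List.pyRange 97 123 1).foldl (fun d i => d.insert (Char.ofNat i.toNat) 0)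
        PySem.Dict.empty), 0, 0)
    = (l.foldl (fun d ch => d.insert ch (d.getD ch 0 + 1))
        ((PySem.List.pyRange 97 123 1).foldl (fun d i => d.insert (Char.ofNat i.toNat) 0)
          PySem.Dict.empty), pvV l, pvC l) := by
  induction l using List.reverseRecOn with
  | nil =>
    simp only [List.foldl_nil, Prod.mk.injEq]
    exact ⟨trivial, by decide, by decide⟩
  | append_singleton l ch ih =>
    have hl : ∀ c ∈ l, 97 ≤ c.toNat ∧ c.toNat ≤ 122 :=
      fun c hc => h c (List.mem_append_left _ hc)
    have hch := h ch (List.mem_append_right _ (List.mem_singleton.mpr rfl))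
    rw [List.foldl_append, List.foldl_append, ih hl]
    have hn : (l.foldl (fun d ch => d.insert ch (d.getD ch 0 + 1))
        ((PySem.List.pyRange 97 123 1).foldl (fun d i => d.insert (Char.ofNat i.toNat) 0)
          PySem.Dict.empty)).getD ch 0 = (l.count ch : Int) := by
      rw [PySem.Dict.getD_foldl_insert_add_one, pv_hash0_getD]
      simp
    simp only [List.foldl_cons, List.foldl_nil, maxFreqSumStep, hn]
    by_cases hv : ch ∈ pvVow
    · have hcont : (PySem.Set.ofList ['a', 'e', 'i', 'o', 'u']).contains ch = true := by
        fin_cases hv <;> decide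
      have hVstep : pvV (l ++ [ch]) = max (pvV l) ((l.count ch : Int) + 1) := by
        apply pv_foldmax_incr pvVow (by decide) _ _ ch hv
          (fun c _ hne => pv_count_snoc_ne l ch c hne) (pv_count_snoc_self l ch)
      have hCstep : pvC (l ++ [ch]) = pvC l := by
        rw [pvC, pvC]
        congr 1
        apply List.map_congr_left
        intro c hc
        refine pv_count_snoc_ne l ch c (fun hce => ?_)
        subst hce
        exact (by fin_cases hv <;> revert hc <;> decide : c ∉ pvConsL) hc
      rw [hVstep, hCstep]
      split_ifs with hif1 hif2
      · simp only [Prod.mk.injEq, true_and]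
        constructor
        · omega
        · trivial
      · simp only [hcont, not_true_eq_false, false_and] at hif2
      · simp only [Prod.mk.injEq, true_and]
        constructor
        · simp only [hcont, true_and] at hif1
          omega
        · trivial
    · have hcont : (PySem.Set.ofList ['a', 'e', 'i', 'o', 'u']).contains ch = false := by
        have hcc := pv_mem_cons ch hch.1 hch.2 hv
        fin_cases hcc <;> decide
      have hcc := pv_mem_cons ch hch.1 hch.2 hv
      have hCstep : pvC (l ++ [ch]) = max (pvC l) ((l.count ch : Int) + 1) := by
        apply pv_foldmax_incr pvConsL (by decide) _ _ ch hcc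
          (fun c _ hne => pv_count_snoc_ne l ch c hne) (pv_count_snoc_self l ch)
      have hVstep : pvV (l ++ [ch]) = pvV l := by
        rw [pvV, pvV]
        congr 1
        apply List.map_congr_left
        intro c hc
        refine pv_count_snoc_ne l ch c (fun hce => ?_)
        subst hce
        exact hv hc
      rw [hVstep, hCstep]
      split_ifs with hif1 hif2
      · rw [hcont] at hif1; simp at hif1
      · simp only [Prod.mk.injEq, true_and]
        obtain ⟨-, h2⟩ := hif2
        omega
      · simp only [Prod.mk.injEq, true_and]
        rw [hcont] at hif2
        simp at hif2
        omega

lemma pv_altB (s : String) (h : ∀ c ∈ s.toList, 97 ≤ c.toNat ∧ c.toNat ≤ 122) :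
    maxFreqSum_alt s = pvV s.toList + pvC s.toList := by
  unfold maxFreqSum_alt
  simp only [PySem.Dict.foldl_insert_getD_add_one_eq_counter, PySem.Dict.getD_counter,
    PySem.Dict.items_counter, List.filter_map, List.map_map]
  have hsnd : ((fun (p : Char × Int) => p.2) ∘ fun k => (k, (↑(List.count k s.toList) : Int)))
      = fun k => (↑(List.count k s.toList) : Int) := rfl
  have hfil : ((fun (p : Char × Int) => ! ['a', 'e', 'i', 'o', 'u'].contains p.1)
        ∘ fun k => (k, (↑(List.count k s.toList) : Int)))
      = fun k => ! ['a', 'e', 'i', 'o', 'u'].contains k := rfl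
  rw [hsnd, hfil]
  rw [pv_maxD_eq_foldl _ (by
        intro y hy; obtain ⟨c, _, rfl⟩ := List.mem_map.mp hy; positivity),
      pv_maxD_eq_foldl _ (by
        intro y hy; obtain ⟨c, _, rfl⟩ := List.mem_map.mp hy; positivity)]
  have h1 : (List.map (fun c => (↑(List.count c s.toList) : Int))
      ['a', 'e', 'i', 'o', 'u']).foldl max 0 = pvV s.toList := rfl
  rw [h1]
  congr 1
  apply le_antisymm
  · rcases PySem.List.foldl_max_mem (List.map (fun c => (↑(List.count c s.toList) : Int))
      (List.filter (fun c => ! ['a', 'e', 'i', 'o', 'u'].contains c)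
        (PySem.Set.ofList s.toList))) 0 with h0 | hm
    · rw [h0]; exact (PySem.List.le_foldl_max _ 0).1
    · obtain ⟨c, hcm, heq⟩ := List.mem_map.mp hm
      obtain ⟨hcs, hcv⟩ := List.mem_filter.mp hcm
      have hcl : c ∈ s.toList := (PySem.Set.mem_ofList _ _).mp hcs
      have hnv : c ∉ pvVow := by
        simp only [Bool.not_eq_eq_eq_not, Bool.not_true, List.contains_eq_mem,
          decide_eq_false_iff_not] at hcv
        exact hcv
      have hc := pv_mem_cons c (h c hcl).1 (h c hcl).2 hnv
      rw [← heq, pvC]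
      exact (PySem.List.le_foldl_max _ 0).2 _ (List.mem_map.mpr ⟨c, hc, rfl⟩)
  · have h2 : pvC s.toList
        = (List.map (fun c => (↑(List.count c s.toList) : Int)) pvConsL).foldl max 0 := rfl
    rw [h2]
    rcases PySem.List.foldl_max_mem
      (List.map (fun c => (↑(List.count c s.toList) : Int)) pvConsL) 0 with h0 | hm
    · rw [h0]; exact (PySem.List.le_foldl_max _ 0).1
    · obtain ⟨c, hc, heq⟩ := List.mem_map.mp hm
      rw [← heq]
      by_cases hcl : c ∈ s.toList
      · have hflt : (! ['a', 'e', 'i', 'o', 'u'].contains c) = true := by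
          fin_cases hc <;> decide
        refine (PySem.List.le_foldl_max _ 0).2 _ (List.mem_map.mpr ⟨c, ?_, rfl⟩)
        exact List.mem_filter.mpr ⟨(PySem.Set.mem_ofList _ _).mpr hcl, hflt⟩
      · have : List.count c s.toList = 0 := List.count_eq_zero.mpr hcl
        rw [this]
        exact_mod_cast (PySem.List.le_foldl_max _ 0).1

-- ===== VERDICT (by name: the statement is the Claim_ definition above) =====
theorem maxFreqSum_spec : Claim_equal_maxFreqSum := by
  intro s _ hpre
  have hpre' : ∀ c ∈ s.toList, 97 ≤ c.toNat ∧ c.toNat ≤ 122 := by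
    intro c hc
    simpa using List.all_eq_true.mp hpre c hc
  unfold Spec_maxFreqSum maxFreqSum
  rw [pv_altB s hpre']
  simp only [pv_invA s.toList hpre']
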